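-- pv_equiv track=rewrite | github.com/thepeacefulprogrammer/my_coding_agent | src/my_coding_agent/core/memory_integration.py | generate_grouped_timeline
-- ===== SOURCE A (Python) =====
-- from typing import Any
--
-- def generate_grouped_timeline(
--
--     events: list[dict[str, Any]],
--     group_by: str = "file_path",
-- ) -> dict[str, list[dict[str, Any]]]:
--     """Generate timeline grouped by specified field.
--
--     Args:
--         events: List of project events
--         group_by: Field to group by ('file_path', 'event_type', etc.)
--
--     Returns:
--         Dictionary of grouped timeline events
--     """
--     grouped = {}
--
--     for event in events:
--         group_key = event.get(group_by, "unknown")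
--         if group_key not in grouped:
--             grouped[group_key] = []
--         grouped[group_key].append(event)
--
--     # Sort events within each group chronologically
--     for group_events in grouped.values():
--         group_events.sort(key=lambda x: x.get("timestamp", 0))
--
--     return grouped
-- ===== SOURCE B (Python) =====
-- def generate_grouped_timeline(events, group_by="file_path"):
--     """Sort the whole list once by timestamp, then partition it into groups
--     whose key order is the keys' first appearance in the original list."""
--     grouped = {event.get(group_by, "unknown"): [] for event in events}
--     for event in sorted(events, key=lambda x: x.get("timestamp", "")):
--         grouped[event.get(group_by, "unknown")].append(event)
--     return grouped
-- ===== Notes on version B (the rewrite author's own statement) =====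
-- stated objective: alternative
-- what changed: B sorts the whole event list once by timestamp (stable) and then partitions it into groups in a single pass, instead of A's grouping pass followed by a separate in-place sort of every group; key order is fixed by a first skeleton pass so the returned dict matches A exactly.
-- crash fix: On inputs where some group mixes events that have a 'timestamp' key with events that lack it, A's group sort raises TypeError (str compared with the int default 0); B sorts with a '' default and returns the group with the timestamp-less events first. — e.g. on generate_grouped_timeline([[("timestamp", "1")], []], "file_path"): A raises TypeError, B returns [("unknown", [[], [("timestamp", "1")]])]
import Mathlib
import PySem

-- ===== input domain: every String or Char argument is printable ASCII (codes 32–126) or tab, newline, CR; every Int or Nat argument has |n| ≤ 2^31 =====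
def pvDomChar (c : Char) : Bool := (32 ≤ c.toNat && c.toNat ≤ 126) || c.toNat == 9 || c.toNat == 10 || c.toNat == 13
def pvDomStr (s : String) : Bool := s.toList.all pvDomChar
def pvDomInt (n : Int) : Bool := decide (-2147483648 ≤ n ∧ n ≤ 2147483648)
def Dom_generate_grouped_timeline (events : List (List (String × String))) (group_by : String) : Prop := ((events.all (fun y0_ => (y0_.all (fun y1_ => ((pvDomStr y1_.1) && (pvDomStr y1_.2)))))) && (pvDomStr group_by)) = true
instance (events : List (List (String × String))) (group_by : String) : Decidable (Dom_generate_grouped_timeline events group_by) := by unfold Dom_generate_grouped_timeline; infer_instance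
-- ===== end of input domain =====

-- B replaces A's group-then-sort-each-group with one global stable sort followed by a single
-- partition pass (key order fixed by a first skeleton pass); alternative decomposition, same cost.

-- event.get(k, d): events are dicts, here association lists (first match wins)
def pvGet (e : List (String × String)) (k d : String) : String :=
  (PySem.Dict.mk e).getD k d

-- 'k in event'
def pvHasKey (e : List (String × String)) (k : String) : Bool :=
  (PySem.Dict.mk e).contains k

-- ===== PORT A =====
-- Python A's per-group sort key is x.get("timestamp", 0); on Pre_ inputs every group either has
-- "timestamp" in all its events or in none, so the "" default below yields the same order
-- (all-absent groups have all-equal keys and the sort is stable). Outside Pre_ Python A raises.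
def generate_grouped_timeline (events : List (List (String × String))) (group_by : String) : List (String × List (List (String × String))) :=
  (events.foldl
    (fun g e =>
      PySem.Dict.modify
        (if g.contains (pvGet e group_by "unknown") then g
         else g.insert (pvGet e group_by "unknown") [])
        (pvGet e group_by "unknown") [] (fun l => l ++ [e]))
    PySem.Dict.empty).items.map
    (fun p => (p.1, PySem.List.sorted p.2 (fun e => pvGet e "timestamp" "")))

-- ===== PORT B =====
def generate_grouped_timeline_alt (events : List (List (String × String))) (group_by : String) : List (String × List (List (String × String))) :=
  ((PySem.List.sorted events (fun e => pvGet e "timestamp" "")).foldl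
      (fun g e => g.modify (pvGet e group_by "unknown") [] (fun l => l ++ [e]))
      (events.foldl (fun g e => g.insert (pvGet e group_by "unknown") ([] : List (List (String × String))))
        PySem.Dict.empty)).items

-- ===== PRECONDITION & SPEC =====
-- Pre_ excludes exactly the inputs where Python A raises TypeError: a group containing both an
-- event with a "timestamp" key and one without makes A's sort compare a str with the int 0.
def Pre_generate_grouped_timeline (events : List (List (String × String))) (group_by : String) : Prop :=
  ∀ e1 ∈ events, ∀ e2 ∈ events,
    pvGet e1 group_by "unknown" = pvGet e2 group_by "unknown" →
    pvHasKey e1 "timestamp" = pvHasKey e2 "timestamp"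
instance (events : List (List (String × String))) (group_by : String) : Decidable (Pre_generate_grouped_timeline events group_by) := by unfold Pre_generate_grouped_timeline; infer_instance

def pvWitness_generate_grouped_timeline : (List (List (String × String))) × String :=
  ([[("file_path", "a"), ("timestamp", "2")], [("file_path", "a"), ("timestamp", "1")], [("file_path", "b")]], "file_path")

-- On inputs where some group mixes events with and without a "timestamp" key, A raises TypeError
-- (it compares a str timestamp with the int default 0); B sorts with the "" default and returns.
def Raises_generate_grouped_timeline (events : List (List (String × String))) (group_by : String) : Prop :=
  ∃ e1 ∈ events, ∃ e2 ∈ events,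
    pvGet e1 group_by "unknown" = pvGet e2 group_by "unknown" ∧
    pvHasKey e1 "timestamp" ≠ pvHasKey e2 "timestamp"
instance (events : List (List (String × String))) (group_by : String) : Decidable (Raises_generate_grouped_timeline events group_by) := by unfold Raises_generate_grouped_timeline; infer_instance

def pvRaiseWitness_generate_grouped_timeline : (List (List (String × String))) × String :=
  ([[("timestamp", "1")], []], "file_path")
def pvRaiseWitnessOut_generate_grouped_timeline : List (String × List (List (String × String))) :=
  [("unknown", [[], [("timestamp", "1")]])]

def Spec_generate_grouped_timeline (events : List (List (String × String))) (group_by : String) (out : List (String × List (List (String × String)))) : Prop := out = generate_grouped_timeline_alt events group_by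
instance (events : List (List (String × String))) (group_by : String) (out : List (String × List (List (String × String)))) : Decidable (Spec_generate_grouped_timeline events group_by out) := by unfold Spec_generate_grouped_timeline; infer_instance

-- ===== CLAIM (what is proved, stated in full; the proofs are below) =====
def Claim_equal_generate_grouped_timeline : Prop := ∀ (events : List (List (String × String))) (group_by : String), Dom_generate_grouped_timeline events group_by → Pre_generate_grouped_timeline events group_by → Spec_generate_grouped_timeline events group_by (generate_grouped_timeline events group_by)

def Claim_raises_generate_grouped_timeline : Prop := (∀ (events : List (List (String × String))) (group_by : String), Dom_generate_grouped_timeline events group_by → Raises_generate_grouped_timeline events group_by → ¬ Pre_generate_grouped_timeline events group_by) ∧ (Dom_generate_grouped_timeline (pvRaiseWitness_generate_grouped_timeline.1) (pvRaiseWitness_generate_grouped_timeline.2) ∧ Raises_generate_grouped_timeline (pvRaiseWitness_generate_grouped_timeline.1) (pvRaiseWitness_generate_grouped_timeline.2) ∧ generate_grouped_timeline_alt (pvRaiseWitness_generate_grouped_timeline.1) (pvRaiseWitness_generate_grouped_timeline.2) = pvRaiseWitnessOut_generate_grouped_timeline)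

-- ===== LEMMAS AND PROOFS =====

-- A's "setdefault then append" step is one dict modify.
theorem pv_step_eq (g : PySem.Dict String (List (List (String × String)))) (k : String) (e : List (String × String)) :
    PySem.Dict.modify (if g.contains k then g else g.insert k []) k [] (fun l => l ++ [e])
      = g.modify k [] (fun l => l ++ [e]) := by
  by_cases h : g.contains k
  · simp [h]
  · rw [if_neg h]
    unfold PySem.Dict.modify
    rw [PySem.Dict.getD_insert_self, PySem.Dict.getD_of_not_contains g [] (by simpa using h),
        PySem.Dict.insert_insert_self]

-- the append-modify loop, keyed by a function of the element
theorem pv_modifyFold_getD (keyf : List (String × String) → String) (l : List (List (String × String)))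
    (d : PySem.Dict String (List (List (String × String)))) (c : String) :
    (l.foldl (fun g e => g.modify (keyf e) [] (fun v => v ++ [e])) d).getD c []
      = d.getD c [] ++ l.filter (fun e => keyf e == c) := by
  have h := PySem.Dict.getD_foldl_modify_append (l.map (fun e => (keyf e, e))) d c
  rw [List.foldl_map] at h
  simpa [List.filter_map, Function.comp_def] using h

-- a fold of inserts with value [] leaves every getD _ [] at []
theorem pv_insertFold_getD' (keyf : List (String × String) → String) (l : List (List (String × String)))
    (d : PySem.Dict String (List (List (String × String))))
    (h : ∀ c, d.getD c [] = []) (c : String) :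
    (l.foldl (fun g e => g.insert (keyf e) []) d).getD c [] = [] := by
  induction l generalizing d with
  | nil => exact h c
  | cons e t ih =>
      refine ih _ (fun c' => ?_)
      rw [PySem.Dict.getD_insert]
      split_ifs with hc
      · rfl
      · exact h c'

-- updating a set with elements it already holds changes nothing
theorem pv_set_update_id (s : PySem.Set String) (l : List String) (h : ∀ x ∈ l, x ∈ s) :
    PySem.Set.update s l = s := by
  induction l generalizing s with
  | nil => rfl
  | cons x t ih =>
      have hx : s.contains x = true := by simpa using h x (by simp)
      simp only [PySem.Set.update, List.foldl_cons]
      rw [show PySem.Set.add s x = s from by rw [PySem.Set.add, if_pos hx]]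
      exact ih s (fun y hy => h y (by simp [hy]))

-- inserting into a sorted list commutes with filter
theorem pv_filter_insertBy {α κ : Type} [LinearOrder κ] (key : α → κ) (p : α → Bool) (x : α)
    (acc : List α) (hs : acc.Pairwise (fun a b => key a ≤ key b)) :
    (PySem.List.insertBy (fun a b => decide (key a < key b)) x acc).filter p
      = if p x then PySem.List.insertBy (fun a b => decide (key a < key b)) x (acc.filter p)
        else acc.filter p := by
  induction acc with
  | nil => by_cases hpx : p x <;> simp [PySem.List.insertBy, hpx]
  | cons y ys ih =>
      rw [List.pairwise_cons] at hs
      by_cases hlt : key x < key y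
      · by_cases hpx : p x
        · rw [if_pos hpx]
          have hins : PySem.List.insertBy (fun a b => decide (key a < key b)) x (y :: ys)
              = x :: y :: ys := by simp [PySem.List.insertBy, hlt]
          rw [hins]
          cases hL : (y :: ys).filter p with
          | nil => simp [hpx, hL, PySem.List.insertBy]
          | cons z zs =>
              have hz : z ∈ y :: ys := List.mem_of_mem_filter (by rw [hL]; exact List.mem_cons_self)
              have hyz : key y ≤ key z := by
                rcases List.mem_cons.mp hz with rfl | hz'
                · exact le_refl _
                · exact hs.1 z hz'
              have hxz : key x < key z := lt_of_lt_of_le hlt hyz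
              simp [hpx, hL, PySem.List.insertBy, hxz]
        · rw [if_neg hpx]
          have hins : PySem.List.insertBy (fun a b => decide (key a < key b)) x (y :: ys)
              = x :: y :: ys := by simp [PySem.List.insertBy, hlt]
          rw [hins]
          simp [List.filter_cons, hpx]
      · have hins : PySem.List.insertBy (fun a b => decide (key a < key b)) x (y :: ys)
            = y :: PySem.List.insertBy (fun a b => decide (key a < key b)) x ys := by
          simp [PySem.List.insertBy, hlt]
        rw [hins]
        by_cases hpy : p y <;> by_cases hpx : p x <;>
          simp [hpy, hpx, ih hs.2, PySem.List.insertBy, hlt]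

theorem pv_sorted_append_singleton {α κ : Type} [LinearOrder κ] (key : α → κ) (l : List α) (x : α) :
    PySem.List.sorted (l ++ [x]) key
      = PySem.List.insertBy (fun a b => decide (key a < key b)) x (PySem.List.sorted l key) := by
  rw [PySem.List.sorted_eq_foldl_insertBy, PySem.List.sorted_eq_foldl_insertBy, List.foldl_append]
  rfl

-- a stable sort commutes with filter
theorem pv_filter_sorted {α κ : Type} [LinearOrder κ] (key : α → κ) (p : α → Bool) (xs : List α) :
    (PySem.List.sorted xs key).filter p = PySem.List.sorted (xs.filter p) key := by
  induction xs using List.reverseRecOn with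
  | nil => rfl
  | append_singleton t x ih =>
      rw [pv_sorted_append_singleton, List.filter_append,
        pv_filter_insertBy key p x _ (PySem.List.sorted_pairwise t key), ih]
      by_cases hpx : p x
      · rw [if_pos hpx, show List.filter p [x] = [x] from by simp [List.filter, hpx],
          pv_sorted_append_singleton]
      · rw [if_neg hpx, show List.filter p [x] = ([] : List α) from by simp [List.filter, hpx],
          List.append_nil]

-- ===== VERDICT (by name: the statement is the Claim_ definition above) =====
theorem generate_grouped_timeline_spec : Claim_equal_generate_grouped_timeline := by
  intro events gb _ _
  unfold Spec_generate_grouped_timeline generate_grouped_timeline generate_grouped_timeline_alt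
  set keyf : List (String × String) → String := fun e => pvGet e gb "unknown" with hkeyf
  set tsf : List (String × String) → String := fun e => pvGet e "timestamp" "" with htsf
  -- A's fold = plain modify fold
  have hstep : (fun (g : PySem.Dict String (List (List (String × String)))) e =>
      PySem.Dict.modify (if g.contains (pvGet e gb "unknown") then g
        else g.insert (pvGet e gb "unknown") []) (pvGet e gb "unknown") [] (fun l => l ++ [e]))
      = fun g e => g.modify (keyf e) [] (fun l => l ++ [e]) :=
    funext fun g => funext fun e => pv_step_eq g _ e
  rw [hstep]
  set G : PySem.Dict String (List (List (String × String))) :=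
    events.foldl (fun g e => g.modify (keyf e) [] (fun l => l ++ [e])) PySem.Dict.empty with hG
  set G0 : PySem.Dict String (List (List (String × String))) :=
    events.foldl (fun g e => g.insert (keyf e) []) PySem.Dict.empty with hG0
  set ordered : List (List (String × String)) := PySem.List.sorted events tsf with hord
  set Bfin : PySem.Dict String (List (List (String × String))) :=
    ordered.foldl (fun g e => g.modify (keyf e) [] (fun l => l ++ [e])) G0 with hBfin
  -- keys
  have hkA : G.keys = PySem.Set.ofList (events.map keyf) := by
    have h : G.keys = PySem.Set.update PySem.Dict.empty.keys (events.map keyf) :=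
      PySem.Dict.keys_foldl_modify_key events keyf [] (fun _ e v => v ++ [e]) PySem.Dict.empty
    rw [h, PySem.Dict.keys_empty]
    exact PySem.Set.update_empty _
  have hk0 : G0.keys = PySem.Set.ofList (events.map keyf) := by
    have h : G0.keys = PySem.Set.update PySem.Dict.empty.keys (events.map keyf) :=
      PySem.Dict.keys_foldl_insert_key events keyf (fun _ _ => []) PySem.Dict.empty
    rw [h, PySem.Dict.keys_empty]
    exact PySem.Set.update_empty _
  have hkB : Bfin.keys = G0.keys := by
    have h : Bfin.keys = PySem.Set.update G0.keys (ordered.map keyf) :=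
      PySem.Dict.keys_foldl_modify_key ordered keyf [] (fun _ e v => v ++ [e]) G0
    rw [h]
    refine pv_set_update_id _ _ (fun x hx => ?_)
    rcases List.mem_map.mp hx with ⟨e, he, rfl⟩
    have he' : e ∈ events := (PySem.List.mem_sorted events tsf false e).mp he
    rw [hk0]
    exact (PySem.Set.mem_ofList _ _).mpr (List.mem_map_of_mem he')
  -- nodup keys
  have hndA : G.keys.Nodup :=
    PySem.Dict.nodup_keys_foldl_modify_key events keyf [] (fun _ e v => v ++ [e])
      PySem.Dict.empty (by rw [PySem.Dict.keys_empty]; exact List.nodup_nil)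
  have hnd0 : G0.keys.Nodup :=
    PySem.Dict.nodup_keys_foldl_insert_key events keyf (fun _ _ => []) PySem.Dict.empty
      (by rw [PySem.Dict.keys_empty]; exact List.nodup_nil)
  have hndB : Bfin.keys.Nodup :=
    PySem.Dict.nodup_keys_foldl_modify_key ordered keyf [] (fun _ e v => v ++ [e]) G0 hnd0
  -- values
  have hgA : ∀ c, G.getD c [] = events.filter (fun e => keyf e == c) := fun c => by
    rw [hG, pv_modifyFold_getD, PySem.Dict.getD_empty, List.nil_append]
  have hg0 : ∀ c, G0.getD c [] = [] := fun c =>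
    pv_insertFold_getD' keyf events PySem.Dict.empty (fun _ => PySem.Dict.getD_empty _ _) c
  have hgB : ∀ c, Bfin.getD c [] = ordered.filter (fun e => keyf e == c) := fun c => by
    rw [hBfin, pv_modifyFold_getD, hg0, List.nil_append]
  -- assemble both sides as maps over the common key list
  rw [PySem.Dict.items_eq_map_keys G hndA [], PySem.Dict.items_eq_map_keys Bfin hndB [],
    hkB, hk0, ← hkA, List.map_map]
  refine List.map_congr_left (fun c _ => ?_)
  simp only [Function.comp_apply]
  rw [hgA c, hgB c, pv_filter_sorted]

@[simp] theorem generate_grouped_timeline_raises : Claim_raises_generate_grouped_timeline := by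
  unfold Claim_raises_generate_grouped_timeline
  constructor
  · intro events gb _ hr hpre
    rcases hr with ⟨e1, h1, e2, h2, hkey, hts⟩
    exact hts (hpre e1 h1 e2 h2 hkey)
  · refine ⟨by decide, by decide, ?_⟩
    have h1 : ("" : String) < "1" := by rw [String.lt_iff_toList_lt]; decide
    simp [pvRaiseWitness_generate_grouped_timeline, pvRaiseWitnessOut_generate_grouped_timeline,
      generate_grouped_timeline_alt, pvGet, PySem.List.sorted, PySem.List.insertBy,
      PySem.Dict.modify, PySem.Dict.insert, PySem.Dict.empty, PySem.Dict.getD,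
      PySem.Dict.get?, PySem.Dict.contains]
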